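-- pv_equiv track=rewrite | github.com/kimlngo/python-algorithm | AppleRedistribution.py | appleRedistribution
-- ===== SOURCE A (Python) =====
-- def appleRedistribution(apple: list[int], capacity:list[int]) -> int:
--     #1) find total count of apples
--     totalApple = sum(apple)
--
--     #2) sort capacity descending order
--     capacity.sort(reverse=True)
--
--     #3) iterate through capacity and substract totalApple
--     boxCount = 0
--
--     while totalApple > 0 and boxCount < len(capacity):
--         cap = capacity[boxCount]
--         totalApple -= cap
--         boxCount += 1
--
--     return boxCount
-- ===== SOURCE B (Python) =====
-- import bisect
-- from itertools import accumulate
--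
--
-- def appleRedistribution(apple: list[int], capacity: list[int]) -> int:
--     total = sum(apple)
--     capacity.sort(reverse=True)
--     if total <= 0:
--         return 0
--     prefix = list(accumulate(capacity))
--     idx = bisect.bisect_left(prefix, total)
--     return min(idx + 1, len(capacity))
-- ===== Notes on version B (the rewrite author's own statement) =====
-- stated objective: alternative
-- what changed: Replaces A's greedy running-subtraction while-loop by a prefix-sum table (itertools.accumulate) over the descending-sorted capacities plus a binary search (bisect.bisect_left) for the first cumulative capacity reaching the apple total; Pre_ restricts to the natural domain of nonnegative box capacities, because with a negative capacity the prefix sums are not monotone and binary search does not apply (A still returns a value there).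
-- outside the precondition, e.g. on appleRedistribution([4], [1, -3, 3, -5]): A returns 2, B returns 4
import Mathlib
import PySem

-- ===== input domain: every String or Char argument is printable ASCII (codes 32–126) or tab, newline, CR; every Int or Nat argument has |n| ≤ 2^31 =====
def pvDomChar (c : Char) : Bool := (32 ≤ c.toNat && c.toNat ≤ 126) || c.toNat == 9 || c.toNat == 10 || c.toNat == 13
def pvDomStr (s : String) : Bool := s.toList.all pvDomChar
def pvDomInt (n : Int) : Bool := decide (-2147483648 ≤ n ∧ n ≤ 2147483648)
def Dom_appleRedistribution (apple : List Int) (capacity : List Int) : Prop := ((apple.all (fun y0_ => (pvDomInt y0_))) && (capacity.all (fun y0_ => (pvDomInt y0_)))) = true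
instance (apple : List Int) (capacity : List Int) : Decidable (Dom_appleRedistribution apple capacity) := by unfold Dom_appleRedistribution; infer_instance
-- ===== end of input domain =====

-- B replaces A's greedy running-subtraction loop by prefix sums plus bisect_left
-- (objective: alternative algorithm, same cost dominated by the sort).
-- Both A and B sort `capacity` in place (same observable mutation); the theorems below
-- are about the return value.

-- ===== PORT A =====
-- the while loop: runs while totalApple > 0 and boxes remain
def appleRedistributionLoop (caps : List Int) (totalApple : Int) (boxCount : Int) : Int :=
  match caps with
  | [] => boxCount
  | c :: rest =>
    if totalApple > 0 then appleRedistributionLoop rest (totalApple - c) (boxCount + 1)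
    else boxCount

def appleRedistribution (apple : List Int) (capacity : List Int) : Int :=
  let totalApple := apple.sum
  let caps := PySem.List.sorted capacity (fun x => x) true
  appleRedistributionLoop caps totalApple 0

-- ===== PORT B =====
-- list(itertools.accumulate(xs)): running sums, ported by hand (exact for int lists)
def buildPrefix (xs : List Int) (s : Int) : List Int :=
  match xs with
  | [] => []
  | c :: rest => (s + c) :: buildPrefix rest (s + c)

def appleRedistribution_alt (apple : List Int) (capacity : List Int) : Int :=
  let total := apple.sum
  let caps := PySem.List.sorted capacity (fun x => x) true
  if total ≤ 0 then 0
  else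
    let pre := buildPrefix caps 0
    let idx := PySem.List.bisectLeft pre total
    min ((idx : Int) + 1) (caps.length : Int)

-- ===== PRECONDITION & SPEC =====
-- Pre_ restricts to the natural domain of the task, nonnegative box capacities:
-- a negative capacity makes the descending prefix sums non-monotone, so binary search
-- does not apply there, while A's sequential loop still returns a value.
def Pre_appleRedistribution (apple : List Int) (capacity : List Int) : Prop :=
  ∀ c ∈ capacity, 0 ≤ c
instance (apple : List Int) (capacity : List Int) : Decidable (Pre_appleRedistribution apple capacity) := by unfold Pre_appleRedistribution; infer_instance

def pvWitness_appleRedistribution : List Int × List Int := ([1, 2], [2, 3])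

def Spec_appleRedistribution (apple : List Int) (capacity : List Int) (out : Int) : Prop := out = appleRedistribution_alt apple capacity
instance (apple : List Int) (capacity : List Int) (out : Int) : Decidable (Spec_appleRedistribution apple capacity out) := by unfold Spec_appleRedistribution; infer_instance

-- ===== CLAIM =====
def Claim_equal_appleRedistribution : Prop := ∀ (apple : List Int) (capacity : List Int), Dom_appleRedistribution apple capacity → Pre_appleRedistribution apple capacity → Spec_appleRedistribution apple capacity (appleRedistribution apple capacity)

-- ===== LEMMAS AND PROOFS =====

-- characterisation of A's loop: it returns boxCount + K where K is the first prefix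
-- reaching the total (capped at the number of boxes)
lemma loop_char (caps : List Int) : ∀ (t b : Int) (K : Nat), K ≤ caps.length →
    (∀ k, k < K → 0 < t - (caps.take k).sum) →
    (K = caps.length ∨ t ≤ (caps.take K).sum) →
    appleRedistributionLoop caps t b = b + (K : Int) := by
  induction caps with
  | nil =>
    intro t b K hK _ _
    have hK0 : K = 0 := by simpa using hK
    subst hK0
    simp [appleRedistributionLoop]
  | cons c rest ih =>
    intro t b K hK hlt hend
    match K with
    | 0 =>
      have ht : t ≤ 0 := by
        rcases hend with h | h
        · simp at h
        · simpa using h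
      simp [appleRedistributionLoop, not_lt.mpr ht]
    | K' + 1 =>
      have ht : 0 < t := by
        have := hlt 0 (by omega)
        simpa using this
      simp only [appleRedistributionLoop, if_pos ht]
      have := ih (t - c) (b + 1) K' (by simpa using hK)
        (fun k hk => by
          have := hlt (k + 1) (by omega)
          simp [List.take_succ_cons] at this
          omega)
        (by
          rcases hend with h | h
          · left; simpa using h
          · right
            simp [List.take_succ_cons] at h
            omega)
      rw [this]
      push_cast
      ring

lemma buildPrefix_length (xs : List Int) : ∀ s, (buildPrefix xs s).length = xs.length := by
  induction xs with
  | nil => intro s; simp [buildPrefix]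
  | cons c rest ih => intro s; simp [buildPrefix, ih]

lemma buildPrefix_getD (xs : List Int) : ∀ (s : Int) (i : Nat), i < xs.length →
    (buildPrefix xs s).getD i 0 = s + (xs.take (i + 1)).sum := by
  induction xs with
  | nil => intro s i h; simp at h
  | cons c rest ih =>
    intro s i h
    match i with
    | 0 => simp [buildPrefix]
    | i + 1 =>
      simp only [buildPrefix, List.getD_cons_succ]
      rw [ih (s + c) i (by simpa using h)]
      simp [List.take_succ_cons]
      ring

lemma buildPrefix_ge (xs : List Int) : ∀ (s : Int), (∀ c ∈ xs, 0 ≤ c) →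
    ∀ y ∈ buildPrefix xs s, s ≤ y := by
  induction xs with
  | nil => intro s _ y hy; simp [buildPrefix] at hy
  | cons c rest ih =>
    intro s hpos y hy
    have hc : 0 ≤ c := hpos c (by simp)
    simp only [buildPrefix, List.mem_cons] at hy
    rcases hy with rfl | hy
    · omega
    · have := ih (s + c) (fun d hd => hpos d (by simp [hd])) y hy
      omega

lemma buildPrefix_pairwise (xs : List Int) : ∀ (s : Int), (∀ c ∈ xs, 0 ≤ c) →
    (buildPrefix xs s).Pairwise (fun a b => a ≤ b) := by
  induction xs with
  | nil => intro s _; simp [buildPrefix]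
  | cons c rest ih =>
    intro s hpos
    simp only [buildPrefix]
    refine List.pairwise_cons.mpr ⟨?_, ih (s + c) (fun d hd => hpos d (by simp [hd]))⟩
    intro y hy
    exact buildPrefix_ge rest (s + c) (fun d hd => hpos d (by simp [hd])) y hy

-- ===== VERDICT (by name: the statement is the Claim_ definition above) =====

theorem appleRedistribution_spec : Claim_equal_appleRedistribution := by
  unfold Claim_equal_appleRedistribution
  intro apple capacity _ hpre
  unfold Spec_appleRedistribution appleRedistribution appleRedistribution_alt
  simp only
  set t := apple.sum with ht
  set caps := PySem.List.sorted capacity (fun x => x) true with hcaps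
  set n := caps.length with hn
  have hcapspos : ∀ c ∈ caps, 0 ≤ c := by
    intro c hc
    exact hpre c ((PySem.List.mem_sorted (xs := capacity) (key := fun x => x)
      (rev := true) (x := c)).mp hc)
  by_cases htot : t ≤ 0
  · rw [if_pos htot]
    cases caps with
    | nil => simp [appleRedistributionLoop]
    | cons c rest => simp [appleRedistributionLoop, not_lt.mpr htot]
  · rw [if_neg htot]
    push_neg at htot
    set pre := buildPrefix caps 0 with hpre'
    have hprelen : pre.length = n := by rw [hpre', buildPrefix_length]
    have hpreval : ∀ i, i < n → pre.getD i 0 = (caps.take (i + 1)).sum := by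
      intro i hi
      rw [hpre', buildPrefix_getD _ _ _ hi]
      ring
    obtain ⟨h1, h2, h3⟩ := PySem.List.bisectLeft_spec pre t
      (buildPrefix_pairwise caps 0 hcapspos)
    set idx := PySem.List.bisectLeft pre t with hidx
    have hidxn : idx ≤ n := by omega
    -- all prefixes strictly below idx are < t
    have hbelow : ∀ k, k ≤ idx → (caps.take k).sum < t := by
      intro k hk
      match k with
      | 0 => simpa using htot
      | k + 1 =>
        have hkn : k < pre.length := by omega
        have := h2 k hkn (by omega)
        rw [← List.getD_eq_getElem pre 0 hkn, hpreval k (by omega)] at this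
        exact this
    by_cases hcase : idx < n
    · have hin : idx < pre.length := by omega
      have hhit : t ≤ (caps.take (idx + 1)).sum := by
        have := h3 idx hin (le_refl idx)
        rwa [← List.getD_eq_getElem pre 0 hin, hpreval idx hcase] at this
      rw [loop_char caps t 0 (idx + 1) (by omega)
        (fun k hk => by have := hbelow k (by omega); omega)
        (Or.inr hhit)]
      have : min ((idx : Int) + 1) (n : Int) = (idx : Int) + 1 := by
        rw [min_eq_left]; omega
      rw [this]
      push_cast
      ring
    · have hidxeq : idx = n := by omega
      rw [loop_char caps t 0 n (le_refl n)
        (fun k hk => by have := hbelow k (by omega); omega)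
        (Or.inl rfl)]
      have : min ((idx : Int) + 1) (n : Int) = (n : Int) := by
        rw [min_eq_right]; omega
      rw [this]
      ring
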